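-- pv_equiv track=rewrite | github.com/toheed-techlogix/R-TIE | src/agents/data_query.py | _pick_value_column_idx
-- ===== SOURCE A (Python) =====
-- from typing import Any, AsyncIterator, Optional
--
-- def _pick_value_column_idx(upper_cols: list[str], date_idx: Optional[int]) -> Optional[int]:
--     """Prefer N_* numeric columns, then anything non-date and non-filter."""
--     for i, c in enumerate(upper_cols):
--         if i == date_idx:
--             continue
--         if c.startswith("N_"):
--             return i
--     # Fall back to any non-date column (useful for non-numeric targets
--     # where we just want to report presence of values)
--     for i, c in enumerate(upper_cols):
--         if i == date_idx:
--             continue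
--         if c in ("V_ACCOUNT_NUMBER", "V_LV_CODE", "V_GL_CODE",
--                  "V_BRANCH_CODE", "V_LOB_CODE"):
--             continue
--         return i
--     return None
-- ===== SOURCE B (Python) =====
-- from typing import Optional
--
-- _FILTER_COLS = {"V_ACCOUNT_NUMBER", "V_LV_CODE", "V_GL_CODE",
--                 "V_BRANCH_CODE", "V_LOB_CODE"}
--
-- def _pick_value_column_idx(upper_cols: list[str], date_idx: Optional[int]) -> Optional[int]:
--     """Single pass: return the first N_* column immediately; remember the
--     first non-date, non-filter column as a fallback."""
--     fallback = None
--     for i, c in enumerate(upper_cols):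
--         if i == date_idx:
--             continue
--         if c.startswith("N_"):
--             return i
--         if fallback is None and c not in _FILTER_COLS:
--             fallback = i
--     return fallback
-- ===== Notes on version B (the rewrite author's own statement) =====
-- stated objective: simpler
-- what changed: Replaced A's two full scans with a single pass that returns the first N_* column immediately and carries the first eligible non-filter column in a fallback accumulator.
import Mathlib
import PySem

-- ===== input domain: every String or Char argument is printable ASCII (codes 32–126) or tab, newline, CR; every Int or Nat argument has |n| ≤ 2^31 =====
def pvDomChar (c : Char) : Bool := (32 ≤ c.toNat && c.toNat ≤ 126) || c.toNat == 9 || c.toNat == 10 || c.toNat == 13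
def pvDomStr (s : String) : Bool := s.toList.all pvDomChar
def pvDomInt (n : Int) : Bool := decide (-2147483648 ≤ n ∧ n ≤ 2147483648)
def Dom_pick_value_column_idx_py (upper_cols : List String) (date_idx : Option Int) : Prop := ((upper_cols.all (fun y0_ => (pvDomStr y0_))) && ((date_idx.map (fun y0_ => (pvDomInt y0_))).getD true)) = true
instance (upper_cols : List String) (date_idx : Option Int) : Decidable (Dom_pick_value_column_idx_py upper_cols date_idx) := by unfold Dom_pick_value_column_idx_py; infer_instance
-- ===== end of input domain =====

-- ===== PORT A =====
-- B's single-pass rewrite of A's two scans; objective: simpler.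
-- filter-column membership test from A's second loop (c in (...))
def pvFilterCols : List String :=
  ["V_ACCOUNT_NUMBER", "V_LV_CODE", "V_GL_CODE", "V_BRANCH_CODE", "V_LOB_CODE"]

-- A's first loop: first index (skipping date_idx) whose column starts with "N_"
def pvLoop1 (l : List String) (date_idx : Option Int) (i : Int) : Option Int :=
  match l with
  | [] => none
  | c :: rest =>
    if some i = date_idx then pvLoop1 rest date_idx (i + 1)
    else if PySem.Str.startswith c "N_" then some i
    else pvLoop1 rest date_idx (i + 1)

-- A's second loop: first index skipping date_idx and the filter columns
def pvLoop2 (l : List String) (date_idx : Option Int) (i : Int) : Option Int :=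
  match l with
  | [] => none
  | c :: rest =>
    if some i = date_idx then pvLoop2 rest date_idx (i + 1)
    else if c ∈ pvFilterCols then pvLoop2 rest date_idx (i + 1)
    else some i

def pick_value_column_idx_py (upper_cols : List String) (date_idx : Option Int) : Option Int :=
  match pvLoop1 upper_cols date_idx 0 with
  | some j => some j
  | none =>
    match pvLoop2 upper_cols date_idx 0 with
    | some j => some j
    | none => none

-- ===== PORT B =====
-- B's single pass with a fallback accumulator
def pvGo (l : List String) (date_idx : Option Int) (i : Int) (fb : Option Int) : Option Int :=
  match l with
  | [] => fb
  | c :: rest =>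
    if some i = date_idx then pvGo rest date_idx (i + 1) fb
    else if PySem.Str.startswith c "N_" then some i
    else pvGo rest date_idx (i + 1)
      (if fb = none ∧ c ∉ pvFilterCols then some i else fb)

def pick_value_column_idx_py_alt (upper_cols : List String) (date_idx : Option Int) : Option Int :=
  pvGo upper_cols date_idx 0 none

-- ===== PRECONDITION & SPEC =====
def Spec_pick_value_column_idx_py (upper_cols : List String) (date_idx : Option Int) (out : Option Int) : Prop := out = pick_value_column_idx_py_alt upper_cols date_idx
instance (upper_cols : List String) (date_idx : Option Int) (out : Option Int) : Decidable (Spec_pick_value_column_idx_py upper_cols date_idx out) := by unfold Spec_pick_value_column_idx_py; infer_instance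

-- ===== CLAIM =====
def Claim_equal_pick_value_column_idx_py : Prop := ∀ (upper_cols : List String) (date_idx : Option Int), Dom_pick_value_column_idx_py upper_cols date_idx → Spec_pick_value_column_idx_py upper_cols date_idx (pick_value_column_idx_py upper_cols date_idx)

-- ===== LEMMAS AND PROOFS =====
-- key invariant: the single pass equals loop1, else the fallback, else loop2
theorem pvGo_eq (l : List String) (d : Option Int) :
    ∀ (i : Int) (fb : Option Int),
      pvGo l d i fb =
        match pvLoop1 l d i with
        | some j => some j
        | none => match fb with
          | some k => some k
          | none => pvLoop2 l d i := by
  induction l with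
  | nil => intro i fb; cases fb <;> simp [pvGo, pvLoop1, pvLoop2]
  | cons c rest ih =>
    intro i fb
    by_cases hd : some i = d
    · simp [pvGo, pvLoop1, pvLoop2, hd, ih]
    · by_cases hn : PySem.Str.startswith c "N_" = true
      all_goals simp only [PySem.Str.startswith_eq] at hn
      all_goals rw [show "N_".toList = ['N', '_'] from rfl] at hn
      · simp [pvGo, pvLoop1, hd, hn]
      · by_cases hf : c ∈ pvFilterCols
        · cases fb <;> simp [pvGo, pvLoop1, pvLoop2, hd, hn, hf, ih]
        · cases fb <;> simp [pvGo, pvLoop1, pvLoop2, hd, hn, hf, ih]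

-- ===== VERDICT =====
theorem pick_value_column_idx_py_spec : Claim_equal_pick_value_column_idx_py := by
  intro upper_cols date_idx _
  unfold Spec_pick_value_column_idx_py pick_value_column_idx_py pick_value_column_idx_py_alt
  rw [pvGo_eq]
  cases pvLoop1 upper_cols date_idx 0 <;>
    cases h2 : pvLoop2 upper_cols date_idx 0 <;> simp
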